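-- pv_equiv track=rewrite | github.com/Tahnan/Advent-of-Code-2023 | advent_01.py | better_part_two
-- ===== SOURCE A (Python) =====
-- TEST_CASE = """1abc2
-- pqr3stu8vwx
-- a1b2c3d4e5f
-- treb7uchet
-- """.strip()
--
-- def part_one(data=TEST_CASE, debug=False):
--     total = 0
--     for line in data.splitlines():
--         digits = [x for x in line if x.isdigit()]
--         total += 10 * int(digits[0]) + int(digits[-1])
--     return total
--
-- def better_part_two(data):
--     # Instead of the above, let's preprocess the data by inserting digits
--     # where the spelled-out forms are.  Not in place of them, because of cases
--     # like "eightwo"!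
--     for spelled, digited in (
--         ('one', 'on1e'),
--         ('two', 'tw2o'),
--         ('three', 'thr3ee'),
--         ('four', 'fo4ur'),
--         ('five', 'fi5ve'),
--         ('six', 'si6x'),
--         ('seven', 'se7en'),
--         ('eight', 'ei8ht'),
--         ('nine', 'ni9ne'),
--         ('zero', 'ze0ro')
--     ):
--         data = data.replace(spelled, digited)
--     return part_one(data=data)
-- ===== SOURCE B (Python) =====
-- # Single forward scan per line: collect digit values at every index (spelled-out
-- # words checked with startswith, so overlapping words like "twone" yield both),
-- # instead of A's ten global str.replace passes.
-- WORDS = {'one': 1, 'two': 2, 'three': 3, 'four': 4, 'five': 5,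
--          'six': 6, 'seven': 7, 'eight': 8, 'nine': 9, 'zero': 0}
--
-- def better_part_two(data):
--     total = 0
--     for line in data.splitlines():
--         vals = []
--         for i in range(len(line)):
--             ch = line[i]
--             if ch.isdigit():
--                 vals.append(int(ch))
--             else:
--                 for w, v in WORDS.items():
--                     if line.startswith(w, i):
--                         vals.append(v)
--                         break
--         total += 10 * vals[0] + vals[-1]
--     return total
-- ===== Notes on version B (the rewrite author's own statement) =====
-- stated objective: alternative
-- what changed: Replaces A's ten global str.replace preprocessing passes (plus a digit-filter pass per line) by a direct single forward scan of each line that records a digit value at every index where a digit or a spelled-out number word starts (startswith at each position, so overlapping words like 'twone' yield both digits).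
import Mathlib
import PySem

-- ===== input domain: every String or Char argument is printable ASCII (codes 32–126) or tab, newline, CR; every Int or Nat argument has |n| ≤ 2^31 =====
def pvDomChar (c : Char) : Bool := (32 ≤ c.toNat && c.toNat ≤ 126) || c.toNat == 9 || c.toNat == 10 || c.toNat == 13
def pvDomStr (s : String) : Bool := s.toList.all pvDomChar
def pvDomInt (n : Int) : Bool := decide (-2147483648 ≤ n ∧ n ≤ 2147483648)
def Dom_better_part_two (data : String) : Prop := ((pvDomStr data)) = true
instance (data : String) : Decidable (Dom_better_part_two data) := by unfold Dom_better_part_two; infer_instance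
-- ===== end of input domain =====

-- B replaces A's ten global str.replace preprocessing passes by a single forward scan of
-- each line recording a digit value wherever a digit or a spelled-out word starts
-- (overlapping words are found at each index); same return value, no speed claim.

-- ===== PORT A =====
def pvPairsA : List (List Char × List Char) := [
  (['o', 'n', 'e'], ['o', 'n', '1', 'e']),
  (['t', 'w', 'o'], ['t', 'w', '2', 'o']),
  (['t', 'h', 'r', 'e', 'e'], ['t', 'h', 'r', '3', 'e', 'e']),
  (['f', 'o', 'u', 'r'], ['f', 'o', '4', 'u', 'r']),
  (['f', 'i', 'v', 'e'], ['f', 'i', '5', 'v', 'e']),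
  (['s', 'i', 'x'], ['s', 'i', '6', 'x']),
  (['s', 'e', 'v', 'e', 'n'], ['s', 'e', '7', 'e', 'n']),
  (['e', 'i', 'g', 'h', 't'], ['e', 'i', '8', 'h', 't']),
  (['n', 'i', 'n', 'e'], ['n', 'i', '9', 'n', 'e']),
  (['z', 'e', 'r', 'o'], ['z', 'e', '0', 'r', 'o'])]

-- part_one body for one line: digits = [x for x in line if x.isdigit()]; 10*int(digits[0])+int(digits[-1]).
-- Python raises IndexError when digits is empty (pyGet? = none); those inputs are outside Pre_.
def pvLineA (line : List Char) : Int :=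
  let digits := line.filter PySem.Chars.isdigit
  match PySem.List.pyGet? digits 0, PySem.List.pyGet? digits (-1) with
  | some a, some b => 10 * (PySem.Int.ofChars? [a]).getD 0 + (PySem.Int.ofChars? [b]).getD 0
  | _, _ => 0

-- part_one: total += ... for each line of data.splitlines()
def pvPartOne (data : List Char) : Int :=
  (PySem.Chars.splitlines data).foldl (fun tot line => tot + pvLineA line) 0

def better_part_two (data : String) : Int :=
  pvPartOne (pvPairsA.foldl (fun s pr => PySem.Chars.replace s pr.1 pr.2) data.toList)

-- ===== PORT B =====
def pvWords : List (List Char × Int) := [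
  (['o', 'n', 'e'], 1),
  (['t', 'w', 'o'], 2),
  (['t', 'h', 'r', 'e', 'e'], 3),
  (['f', 'o', 'u', 'r'], 4),
  (['f', 'i', 'v', 'e'], 5),
  (['s', 'i', 'x'], 6),
  (['s', 'e', 'v', 'e', 'n'], 7),
  (['e', 'i', 'g', 'h', 't'], 8),
  (['n', 'i', 'n', 'e'], 9),
  (['z', 'e', 'r', 'o'], 0)]

def pvVd (c : Char) : Int := (PySem.Int.ofChars? [c]).getD 0

-- the scan over positions i of the line (recursion on the suffix line[i:]);
-- at each position: a digit, else the first word of ws that starts there (break)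
def pvScanW (ws : List (List Char × Int)) : List Char → List Int
  | [] => []
  | c :: t =>
    if PySem.Chars.isdigit c then
      pvVd c :: pvScanW ws t
    else
      match ws.findSome? (fun wv => if PySem.Chars.startswith (c :: t) wv.1 then some wv.2 else none) with
      | some v => v :: pvScanW ws t
      | none => pvScanW ws t

-- 10*vals[0] + vals[-1]; IndexError (excluded by Pre_) when vals is empty
def pvLineB (line : List Char) : Int :=
  let vals := pvScanW pvWords line
  match PySem.List.pyGet? vals 0, PySem.List.pyGet? vals (-1) with
  | some a, some b => 10 * a + b
  | _, _ => 0

def better_part_two_alt (data : String) : Int :=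
  (PySem.Chars.splitlines data.toList).foldl (fun tot line => tot + pvLineB line) 0

-- ===== PRECONDITION & SPEC =====
-- Pre_ excludes exactly the inputs on which the Python A raises IndexError: data with a line
-- containing no digit and no spelled-out number word (both Pythons raise there).
def Pre_better_part_two (data : String) : Prop :=
  ∀ line ∈ PySem.Chars.splitlines data.toList,
    line.any PySem.Chars.isdigit = true ∨ ∃ wv ∈ pvWords, PySem.Chars.isIn wv.1 line = true

instance (data : String) : Decidable (Pre_better_part_two data) := by
  unfold Pre_better_part_two; infer_instance

def pvWitness_better_part_two : String := "1abc2\npqrtwone3"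

def Spec_better_part_two (data : String) (out : Int) : Prop := out = better_part_two_alt data
instance (data : String) (out : Int) : Decidable (Spec_better_part_two data out) := by
  unfold Spec_better_part_two; infer_instance

-- ===== CLAIM (what is proved, stated in full; the proofs are below) =====
def Claim_equal_better_part_two : Prop := ∀ (data : String), Dom_better_part_two data → Pre_better_part_two data → Spec_better_part_two data (better_part_two data)

-- ===== LEMMAS AND PROOFS =====

-- ---------- generic prefix helpers ----------

theorem pvPrefLe {u A X : List Char} (h : u.length ≤ A.length) : u <+: A ++ X ↔ u <+: A := by
  constructor
  · intro hp
    have h1 := List.prefix_iff_eq_take.1 hp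
    rw [List.take_append_of_le_length h] at h1
    exact h1 ▸ List.take_prefix _ _
  · exact fun hp => hp.trans (List.prefix_append _ _)

theorem pvPrefGt {u A X : List Char} (h : A.length ≤ u.length) :
    u <+: A ++ X ↔ A <+: u ∧ u.drop A.length <+: X := by
  constructor
  · intro hp
    have hA : A <+: u := by
      have h1 := List.prefix_iff_eq_take.1 hp
      have h2 : (A ++ X).take A.length = A := by
        rw [List.take_append_of_le_length (le_refl A.length), List.take_length]
      have h3 : u.take A.length = A := by
        rw [h1, List.take_take, min_eq_left h, h2]
      exact h3 ▸ List.take_prefix _ _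
    refine ⟨hA, ?_⟩
    obtain ⟨r, hr⟩ := hp
    obtain ⟨s, hs⟩ := hA
    subst hs
    rw [List.append_assoc] at hr
    have := List.append_cancel_left hr
    rw [List.drop_left]
    exact ⟨r, this⟩
  · rintro ⟨⟨s, hs⟩, hd⟩
    subst hs
    rw [List.drop_left] at hd
    obtain ⟨r, hr⟩ := hd
    exact ⟨r, by rw [List.append_assoc, hr]⟩

theorem pvDfreePref {u A B : List Char} {d : Char}
    (hu : u.all (fun c => !PySem.Chars.isdigit c) = true)
    (hd : PySem.Chars.isdigit d = true)
    (h : u <+: A ++ d :: B) : u <+: A := by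
  by_cases hle : u.length ≤ A.length
  · exact (pvPrefLe hle).1 h
  · exfalso
    have ⟨_, hdrop⟩ := (pvPrefGt (by omega)).1 h
    have hne : u.drop A.length ≠ [] := by
      simp only [ne_eq, List.drop_eq_nil_iff]
      omega
    have hdmem : d ∈ u := by
      obtain ⟨c, t', hct⟩ := List.exists_cons_of_ne_nil hne
      have : c = d := by
        obtain ⟨r, hr⟩ := hdrop
        rw [hct] at hr
        exact (List.cons.injEq _ _ _ _ ▸ hr).1
      have : d ∈ u.drop A.length := by rw [hct, this]; exact List.mem_cons_self
      exact List.mem_of_mem_drop this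
    have := List.all_eq_true.1 hu d hdmem
    simp [hd] at this

-- ---------- structural replace ----------

def pvRep (o n : List Char) : List Char → List Char
  | [] => []
  | c :: t =>
    if o ≠ [] ∧ o <+: (c :: t) then n ++ pvRep o n (List.drop (o.length - 1) t)
    else c :: pvRep o n t
termination_by l => l.length
decreasing_by
  · simp only [List.length_cons, List.length_drop]; omega
  · simp

theorem pvRep_nil (o n : List Char) : pvRep o n [] = [] := by simp [pvRep]

theorem pvRep_cons_neg {o : List Char} (n : List Char) {c : Char} {t : List Char}
    (h : ¬ o <+: (c :: t)) : pvRep o n (c :: t) = c :: pvRep o n t := by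
  rw [pvRep]; simp [h]

theorem pvRep_match {o : List Char} (n : List Char) (t : List Char) (ho : o ≠ []) :
    pvRep o n (o ++ t) = n ++ pvRep o n t := by
  obtain ⟨c, o', rfl⟩ := List.exists_cons_of_ne_nil ho
  rw [List.cons_append, pvRep]
  simp only [List.length_cons, Nat.add_sub_cancel]
  rw [if_pos ⟨by simp, by exact List.prefix_append _ _⟩, List.drop_left]

theorem pvRep_head {o n : List Char} (ho : o ≠ []) (hn : n ≠ []) (hh : n.head? = o.head?) :
    ∀ t : List Char, (pvRep o n t).head? = t.head? := by
  intro t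
  cases t with
  | nil => simp [pvRep_nil]
  | cons c t' =>
    by_cases hp : o <+: (c :: t')
    · obtain ⟨r, hr⟩ := hp
      rw [← hr, pvRep_match n r ho]
      cases n with
      | nil => exact absurd rfl hn
      | cons a n' =>
        cases o with
        | nil => exact absurd rfl ho
        | cons b o' => simpa using hh
    · simp [pvRep_cons_neg n hp]

-- bridge: PySem.Chars.replace = pvRep for nonempty pattern
theorem pvReplaceGo_eq (o n : List Char) (ho : o ≠ []) :
    ∀ fuel l acc, l.length ≤ fuel →
      PySem.Chars.replace.go o n fuel l acc = acc.reverse ++ pvRep o n l := by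
  intro fuel
  induction fuel with
  | zero =>
    intro l acc hl
    have : l = [] := by cases l <;> simp_all
    subst this
    rw [PySem.Chars.replace.go]
    simp [pvRep_nil]
  | succ fuel ih =>
    intro l acc hl
    cases l with
    | nil =>
      rw [PySem.Chars.replace.go]
      · simp [pvRep_nil]
      · omega
    | cons c t =>
      rw [PySem.Chars.replace.go]
      by_cases hp : o.isPrefixOf (c :: t)
      · rw [if_pos hp]
        have hp' : o <+: (c :: t) := List.isPrefixOf_iff_prefix.1 hp
        obtain ⟨r, hr⟩ := hp'
        have hlen : (List.drop o.length (c :: t)).length ≤ fuel := by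
          simp only [List.length_drop, List.length_cons] at *
          have : 1 ≤ o.length := by cases o <;> simp_all
          omega
        rw [ih _ _ hlen, ← hr, List.drop_left, pvRep_match n r ho]
        simp
      · rw [if_neg hp]
        have hp' : ¬ o <+: (c :: t) := fun h => hp (List.isPrefixOf_iff_prefix.2 h)
        rw [ih _ _ (by simpa using hl), pvRep_cons_neg n hp']
        simp

theorem pvReplace_eq (s o n : List Char) (ho : o ≠ []) :
    PySem.Chars.replace s o n = pvRep o n s := by
  rw [PySem.Chars.replace]
  rw [if_neg (by simpa using ho)]
  simpa using pvReplaceGo_eq o n ho s.length s [] (le_refl _)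

-- ---------- splitlines characterization ----------

def pvIsB (c : Char) : Bool :=
  have n := c.toNat
  decide (n = 10) || decide (n = 13) || decide (n = 11) || decide (n = 12) || decide (n = 28) ||
    decide (n = 29) || decide (n = 30) || decide (n = 133) || decide (n = 8232) || decide (n = 8233)

def pvSplit (pre : List Char) : List Char → List (List Char)
  | [] => if pre.isEmpty then [] else [pre]
  | '\x0d' :: '\n' :: rest => pre :: pvSplit [] rest
  | c :: rest => if pvIsB c then pre :: pvSplit [] rest else pvSplit (pre ++ [c]) rest

theorem pvSplit_nil_eq (pre : List Char) :
    pvSplit pre [] = if pre.isEmpty then [] else [pre] := by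
  rw [pvSplit]

theorem pvSplit_crlf (pre r : List Char) :
    pvSplit pre ('\x0d' :: '\n' :: r) = pre :: pvSplit [] r := by
  rw [pvSplit]

theorem pvSplit_cons {c : Char} {r : List Char} (pre : List Char)
    (h : c ≠ '\x0d' ∨ ∀ r2, r ≠ '\n' :: r2) :
    pvSplit pre (c :: r) = if pvIsB c then pre :: pvSplit [] r else pvSplit (pre ++ [c]) r := by
  rw [pvSplit]
  intro r2 hc hr
  rcases h with h | h
  · exact h hc
  · exact h r2 hr

theorem pvSplitGo_eq : ∀ (l : List Char) (cur : List Char) (acc : List (List Char)),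
    PySem.Chars.splitlines.go pvIsB l cur acc = acc.reverse ++ pvSplit cur.reverse l := by
  have H : ∀ N (l : List Char) cur acc, l.length ≤ N →
      PySem.Chars.splitlines.go pvIsB l cur acc = acc.reverse ++ pvSplit cur.reverse l := by
    intro N
    induction N with
    | zero =>
      intro l cur acc hl
      have : l = [] := by cases l <;> simp_all
      subst this
      rw [PySem.Chars.splitlines.go, pvSplit_nil_eq]
      by_cases hcur : cur = [] <;> simp [hcur]
    | succ N ih =>
      intro l cur acc hl
      cases l with
      | nil =>
        rw [PySem.Chars.splitlines.go, pvSplit_nil_eq]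
        by_cases hcur : cur = [] <;> simp [hcur]
      | cons c rest =>
        by_cases hcr : c = '\x0d' ∧ ∃ r2, rest = '\n' :: r2
        · obtain ⟨hc, r2, hr⟩ := hcr
          subst hc; subst hr
          rw [PySem.Chars.splitlines.go, pvSplit_crlf]
          rw [ih r2 [] (cur.reverse :: acc) (by simp at hl ⊢; omega)]
          simp
        · have hside : c ≠ '\x0d' ∨ ∀ r2, rest ≠ '\n' :: r2 := by
            by_cases hc : c = '\x0d'
            · right; intro r2 hr; exact hcr ⟨hc, r2, hr⟩
            · left; exact hc
          rw [pvSplit_cons cur.reverse hside]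
          rw [PySem.Chars.splitlines.go]
          · by_cases hb : pvIsB c
            · rw [if_pos hb, if_pos hb]
              rw [ih rest [] (cur.reverse :: acc) (by simp at hl ⊢; omega)]
              simp
            · rw [if_neg hb, if_neg hb]
              rw [ih rest (c :: cur) acc (by simp at hl ⊢; omega)]
              simp
          · intro r2 hc hr
            rcases hside with h | h
            · exact h hc
            · exact h r2 hr
  exact fun l cur acc => H l.length l cur acc (le_refl _)

theorem pvSplitlines_eq (s : List Char) : PySem.Chars.splitlines s = pvSplit [] s := by
  rw [PySem.Chars.splitlines]
  exact pvSplitGo_eq s [] []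

def pvConsFirst (a : List Char) : List (List Char) → List (List Char)
  | [] => if a.isEmpty then [] else [a]
  | h :: t => (a ++ h) :: t

theorem pvConsFirst_append (a b : List Char) (s : List (List Char)) :
    pvConsFirst (a ++ b) s = pvConsFirst a (pvConsFirst b s) := by
  cases s with
  | nil =>
    by_cases hb : b = [] <;> by_cases ha : a = [] <;>
      simp [pvConsFirst, ha, hb, List.isEmpty_iff]
  | cons h t => simp [pvConsFirst]

theorem pvConsFirst_nil (s : List (List Char)) : pvConsFirst [] s = s := by
  cases s <;> simp [pvConsFirst]

theorem pvSplit_pre : ∀ (l : List Char) (pre : List Char),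
    pvSplit pre l = pvConsFirst pre (pvSplit [] l) := by
  have H : ∀ N (l : List Char) pre, l.length ≤ N →
      pvSplit pre l = pvConsFirst pre (pvSplit [] l) := by
    intro N
    induction N with
    | zero =>
      intro l pre hl
      have : l = [] := by cases l <;> simp_all
      subst this
      rw [pvSplit_nil_eq, pvSplit_nil_eq]
      by_cases hpre : pre = [] <;> simp [hpre, pvConsFirst]
    | succ N ih =>
      intro l pre hl
      cases l with
      | nil =>
        rw [pvSplit_nil_eq, pvSplit_nil_eq]
        by_cases hpre : pre = [] <;> simp [hpre, pvConsFirst]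
      | cons c rest =>
        by_cases hcr : c = '\x0d' ∧ ∃ r2, rest = '\n' :: r2
        · obtain ⟨hc, r2, hr⟩ := hcr
          subst hc; subst hr
          rw [pvSplit_crlf, pvSplit_crlf]
          simp [pvConsFirst]
        · have hside : c ≠ '\x0d' ∨ ∀ r2, rest ≠ '\n' :: r2 := by
            by_cases hc : c = '\x0d'
            · right; intro r2 hr; exact hcr ⟨hc, r2, hr⟩
            · left; exact hc
          rw [pvSplit_cons pre hside, pvSplit_cons [] hside]
          by_cases hb : pvIsB c
          · simp [hb, pvConsFirst]
          · rw [if_neg hb, if_neg hb]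
            rw [ih rest (pre ++ [c]) (by simp at hl ⊢; omega),
                ih rest ([] ++ [c]) (by simp at hl ⊢; omega)]
            rw [List.nil_append, pvConsFirst_append]
  exact fun l pre => H l.length l pre (le_refl _)

def pvBreakFree (a : List Char) : Prop := ∀ c ∈ a, pvIsB c = false

theorem pvBF (a : List Char) (h : a.all (fun c => !pvIsB c) = true) : pvBreakFree a := by
  intro c hc
  have := List.all_eq_true.1 h c hc
  simpa using this

theorem pvSplit_append {a : List Char} (ha : pvBreakFree a) (y : List Char) :
    pvSplit [] (a ++ y) = pvConsFirst a (pvSplit [] y) := by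
  induction a with
  | nil => simp [pvConsFirst_nil]
  | cons c a' iha =>
    have hb : pvIsB c = false := ha c List.mem_cons_self
    have hc : c ≠ '\x0d' := by
      intro hc; subst hc; simp [pvIsB] at hb
    rw [List.cons_append, pvSplit_cons [] (Or.inl hc), if_neg (by simp [hb])]
    rw [List.nil_append, pvSplit_pre _ [c], iha fun x hx => ha x (List.mem_cons_of_mem _ hx)]
    rw [← pvConsFirst_append]
    rfl

theorem pvSplit_nil_iff (l : List Char) : pvSplit [] l = [] ↔ l = [] := by
  constructor
  · intro h
    cases l with
    | nil => rfl
    | cons c rest =>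
      exfalso
      by_cases hcr : c = '\x0d' ∧ ∃ r2, rest = '\n' :: r2
      · obtain ⟨hc, r2, hr⟩ := hcr
        subst hc; subst hr
        rw [pvSplit_crlf] at h
        exact List.cons_ne_nil _ _ h
      · have hside : c ≠ '\x0d' ∨ ∀ r2, rest ≠ '\n' :: r2 := by
          by_cases hc : c = '\x0d'
          · right; intro r2 hr; exact hcr ⟨hc, r2, hr⟩
          · left; exact hc
        rw [pvSplit_cons [] hside] at h
        by_cases hb : pvIsB c
        · rw [if_pos hb] at h; exact List.cons_ne_nil _ _ h
        · rw [if_neg hb, List.nil_append, pvSplit_pre _ [c]] at h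
          cases hS : pvSplit [] rest with
          | nil => rw [hS] at h; simp [pvConsFirst] at h
          | cons x xs => rw [hS] at h; simp [pvConsFirst] at h
  · intro h; subst h; rfl

theorem pvSplit_first_prefix : ∀ {t h : List Char} {tl : List (List Char)},
    pvSplit [] t = h :: tl → h <+: t := by
  have H : ∀ N (t : List Char), t.length ≤ N → ∀ (h : List Char) tl,
      pvSplit [] t = h :: tl → h <+: t := by
    intro N
    induction N with
    | zero =>
      intro t ht h tl he
      have : t = [] := by cases t <;> simp_all
      subst this
      simp [pvSplit_nil_eq] at he
    | succ N ih =>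
      intro t ht h tl he
      cases t with
      | nil => simp [pvSplit_nil_eq] at he
      | cons c rest =>
        by_cases hcr : c = '\x0d' ∧ ∃ r2, rest = '\n' :: r2
        · obtain ⟨hc, r2, hr⟩ := hcr
          subst hc; subst hr
          rw [pvSplit_crlf] at he
          injection he with h1 _
          rw [← h1]
          exact List.nil_prefix
        · have hside : c ≠ '\x0d' ∨ ∀ r2, rest ≠ '\n' :: r2 := by
            by_cases hc : c = '\x0d'
            · right; intro r2 hr; exact hcr ⟨hc, r2, hr⟩
            · left; exact hc
          rw [pvSplit_cons [] hside] at he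
          by_cases hb : pvIsB c
          · rw [if_pos hb] at he
            injection he with h1 _
            rw [← h1]
            exact List.nil_prefix
          · rw [if_neg hb, List.nil_append, pvSplit_pre _ [c]] at he
            cases hS : pvSplit [] rest with
            | nil =>
              rw [hS] at he
              simp only [pvConsFirst, List.isEmpty_cons] at he
              injection he with h1 _
              rw [← h1]
              simp
            | cons x xs =>
              rw [hS] at he
              simp only [pvConsFirst, List.singleton_append] at he
              have hx : h = c :: x := by injection he with h1 _; exact h1.symm
              have : x <+: rest := ih rest (by simp at ht ⊢; omega) x xs hS
              rw [hx]
              exact (List.prefix_cons_inj c).2 this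
  exact fun {t h tl} he => H t.length t (le_refl _) h tl he

-- commutation: splitlines ∘ replace = map replace ∘ splitlines
theorem pvSplit_rep {o n : List Char} (ho2 : 2 ≤ o.length) (hn : n ≠ [])
    (hbo : pvBreakFree o) (hbn : pvBreakFree n) (hh : n.head? = o.head?) :
    ∀ x : List Char, pvSplit [] (pvRep o n x) = (pvSplit [] x).map (pvRep o n) := by
  have ho : o ≠ [] := by intro h; subst h; simp at ho2
  have H : ∀ N (x : List Char), x.length ≤ N →
      pvSplit [] (pvRep o n x) = (pvSplit [] x).map (pvRep o n) := by
    intro N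
    induction N with
    | zero =>
      intro x hx
      have : x = [] := by cases x <;> simp_all
      subst this
      simp [pvRep_nil, pvSplit_nil_eq]
    | succ N ih =>
      intro x hx
      by_cases hox : o <+: x
      · obtain ⟨t', rfl⟩ := hox
        rw [pvRep_match n t' ho, pvSplit_append hbn, pvSplit_append hbo]
        have hlen : t'.length ≤ N := by simp at hx; omega
        rw [ih t' hlen]
        cases hS : pvSplit [] t' with
        | nil =>
          have : t' = [] := (pvSplit_nil_iff t').1 hS
          subst this
          simp only [List.map_nil, pvConsFirst]
          rw [if_neg (by simpa using hn), if_neg (by simpa using ho)]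
          have h5 : pvRep o n o = n := by
            have := pvRep_match n [] ho
            simpa [pvRep_nil] using this
          simp [h5]
        | cons h tl =>
          simp only [List.map_cons, pvConsFirst]
          rw [pvRep_match n h ho]
      · cases x with
        | nil => simp [pvRep_nil, pvSplit_nil_eq]
        | cons c t =>
          have hrep : pvRep o n (c :: t) = c :: pvRep o n t := pvRep_cons_neg n hox
          rw [hrep]
          have hlent : t.length ≤ N := by simp at hx; omega
          by_cases hb : pvIsB c
          · by_cases hc : c = '\x0d'
            · subst hc
              -- three subcases on t
              cases t with
              | nil =>
                rw [pvRep_nil, pvSplit_cons [] (Or.inr (by simp)), if_pos hb]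
                simp [pvSplit_nil_eq, pvRep_nil]
              | cons c2 t2 =>
                by_cases hc2 : c2 = '\n'
                · subst hc2
                  have hrt : pvRep o n ('\n' :: t2) = '\n' :: pvRep o n t2 := by
                    apply pvRep_cons_neg
                    intro hpre
                    have : o.head? = some '\n' := by
                      cases o with
                      | nil => exact absurd rfl ho
                      | cons a o' =>
                        obtain ⟨r, hr⟩ := hpre
                        simp at hr
                        simp [hr.1]
                    have hmem : '\n' ∈ o := by
                      cases o with
                      | nil => exact absurd rfl ho
                      | cons a o' => simp at this; simp [this]
                    have := hbo _ hmem
                    simp [pvIsB] at this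
                  have hlent2 : t2.length ≤ N := by simp at hx; omega
                  rw [hrt, pvSplit_crlf, pvSplit_crlf, ih t2 hlent2]
                  simp [pvRep_nil]
                · -- c2 ≠ '\n' : rep t starts with c2 as well
                  have hhead : (pvRep o n (c2 :: t2)).head? = some c2 := by
                    rw [pvRep_head ho hn hh]; rfl
                  cases hR : pvRep o n (c2 :: t2) with
                  | nil => rw [hR] at hhead; simp at hhead
                  | cons d rt =>
                    rw [hR] at hhead
                    have hd : d = c2 := by simpa using hhead
                    subst hd
                    have e1 : pvSplit [] ('\x0d' :: d :: rt) = [] :: pvSplit [] (d :: rt) := by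
                      rw [pvSplit_cons [] (Or.inr (by intro r2 hcon; injection hcon with e _; exact hc2 e)), if_pos hb]
                    have e2 : pvSplit [] ('\x0d' :: d :: t2) = [] :: pvSplit [] (d :: t2) := by
                      rw [pvSplit_cons [] (Or.inr (by intro r2 hcon; injection hcon with e _; exact hc2 e)), if_pos hb]
                    rw [e1, ← hR, ih _ hlent, e2]
                    simp [pvRep_nil]
            · rw [pvSplit_cons [] (Or.inl hc), pvSplit_cons [] (Or.inl hc), if_pos hb, if_pos hb]
              rw [ih t hlent]
              simp [pvRep_nil]
          · have hc : c ≠ '\x0d' := by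
              intro hcc; subst hcc; simp [pvIsB] at hb
            rw [pvSplit_cons [] (Or.inl hc), pvSplit_cons [] (Or.inl hc), if_neg hb, if_neg hb]
            rw [List.nil_append, pvSplit_pre _ [c], pvSplit_pre _ [c]]
            rw [ih t hlent]
            cases hS : pvSplit [] t with
            | nil =>
              have : t = [] := (pvSplit_nil_iff t).1 hS
              subst this
              have hrc : pvRep o n [c] = [c] := by
                rw [pvRep_cons_neg n (by
                  intro hpre
                  have := hpre.length_le
                  simp at this; omega), pvRep_nil]
              simp [pvConsFirst, hrc]
            | cons h tl =>
              simp only [List.map_cons, pvConsFirst]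
              have hpref : h <+: t := pvSplit_first_prefix hS
              have : pvRep o n (c :: h) = c :: pvRep o n h := by
                apply pvRep_cons_neg
                intro hpre
                exact hox (hpre.trans ((List.prefix_cons_inj c).2 hpref))
              simp [this]
  exact fun x => H x.length x (le_refl _)

-- ---------- scan lemmas ----------

theorem pvFindSome?_none (M : List (List Char × Int)) (l : List Char)
    (h : ∀ wv ∈ M, ¬ wv.1 <+: l) :
    M.findSome? (fun wv => if PySem.Chars.startswith l wv.1 then some wv.2 else none) = none := by
  induction M with
  | nil => rfl
  | cons wv M ih =>
    rw [List.findSome?_cons]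
    have : PySem.Chars.startswith l wv.1 = false := by
      rw [PySem.Chars.startswith]
      exact Bool.eq_false_iff.2 fun hc =>
        h wv List.mem_cons_self (List.isPrefixOf_iff_prefix.1 hc)
    rw [this]
    exact ih fun w hw => h w (List.mem_cons_of_mem _ hw)

theorem pvFindSome?_congr (M : List (List Char × Int)) (l l' : List Char)
    (h : ∀ wv ∈ M, (wv.1 <+: l ↔ wv.1 <+: l')) :
    M.findSome? (fun wv => if PySem.Chars.startswith l wv.1 then some wv.2 else none) =
    M.findSome? (fun wv => if PySem.Chars.startswith l' wv.1 then some wv.2 else none) := by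
  induction M with
  | nil => rfl
  | cons wv M ih =>
    rw [List.findSome?_cons, List.findSome?_cons]
    have heq : PySem.Chars.startswith l wv.1 = PySem.Chars.startswith l' wv.1 := by
      simp only [PySem.Chars.startswith]
      rcases hb : wv.1.isPrefixOf l' with _ | _
      · exact (Bool.eq_false_iff.2 fun hc => (Bool.eq_false_iff.1 hb)
          (List.isPrefixOf_iff_prefix.2 ((h wv List.mem_cons_self).1 (List.isPrefixOf_iff_prefix.1 hc))))
      · exact (List.isPrefixOf_iff_prefix.2 ((h wv List.mem_cons_self).2 (List.isPrefixOf_iff_prefix.1 hb)))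
    rw [heq]
    cases PySem.Chars.startswith l' wv.1 <;> simp_all [ih fun w hw => h w (List.mem_cons_of_mem _ hw)]

theorem pvScan_nilW (x : List Char) :
    pvScanW [] x = (x.filter PySem.Chars.isdigit).map pvVd := by
  induction x with
  | nil => simp [pvScanW]
  | cons c t ih =>
    rw [pvScanW]
    by_cases hc : PySem.Chars.isdigit c <;> simp [hc, List.findSome?, ih]

theorem pvScan_seg (M : List (List Char × Int)) :
    ∀ (seg X : List Char),
      (∀ c s', (c :: s') <:+ seg →
        PySem.Chars.isdigit c = false ∧ ∀ wv ∈ M, ¬ wv.1 <+: (c :: s') ++ X) →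
      pvScanW M (seg ++ X) = pvScanW M X := by
  intro seg
  induction seg with
  | nil => simp
  | cons c rest ih =>
    intro X h
    have hc := h c rest List.suffix_rfl
    rw [List.cons_append, pvScanW, if_neg (by simp [hc.1])]
    rw [pvFindSome?_none M _ (by simpa using hc.2)]
    exact ih X fun c' s' hs => h c' s' (hs.trans (List.suffix_cons _ _))

-- ===== the one-pass lemma =====

theorem pvRL2 {w p q : List Char} {d : Char} (SUF : List (List Char))
    (hpw : p <+: w) (hplt : p.length < w.length) (hp2 : 2 ≤ p.length)
    (hd : PySem.Chars.isdigit d = true)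
    (hcl : ∀ s ∈ SUF, s.tail ∈ SUF)
    (hs : ∀ s ∈ SUF, 2 ≤ s.length →
      s.all (fun c => !PySem.Chars.isdigit c) = true ∧ ¬ w <+: s ∧ (s <+: w → s <+: p)) :
    ∀ (t : List Char), ∀ s ∈ SUF, (s <+: pvRep w (p ++ d :: q) t ↔ s <+: t) := by
  have hww : w ≠ [] := by intro h; subst h; simp at hplt
  intro t
  induction t with
  | nil => intro s _; rw [pvRep_nil]
  | cons c t' ih =>
    intro s hmem
    by_cases hw : w <+: (c :: t')
    · obtain ⟨r, hr⟩ := hw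
      rw [← hr, pvRep_match _ r hww]
      cases s with
      | nil => simp
      | cons a s' =>
        cases s' with
        | nil =>
          -- single char: both sides say a = first char
          cases p with
          | nil => simp at hp2
          | cons p0 p' =>
            cases w with
            | nil => exact absurd rfl hww
            | cons w0 w' =>
              have hp0 : p0 = w0 := (List.cons_prefix_cons.1 hpw).1
              simp [List.cons_prefix_cons, hp0]
        | cons b s'' =>
          have hlen2 : 2 ≤ (a :: b :: s'').length := by simp
          obtain ⟨hdf, hnw, hsp⟩ := hs _ hmem hlen2
          by_cases hsp2 : (a :: b :: s'') <+: p
          · constructor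
            · intro _
              exact (hsp2.trans hpw).trans (List.prefix_append w r)
            · intro _
              rw [List.append_assoc]
              exact hsp2.trans (List.prefix_append _ _)
          · constructor
            · intro hL
              exfalso
              rw [List.append_assoc, List.cons_append] at hL
              exact hsp2 (pvDfreePref hdf hd hL)
            · intro hR
              exfalso
              by_cases hlw : (a :: b :: s'').length ≤ w.length
              · exact hsp2 (hsp ((pvPrefLe hlw).1 hR))
              · exact hnw (((pvPrefGt (by omega)).1 hR).1)
    · rw [pvRep_cons_neg _ hw]
      cases s with
      | nil => simp
      | cons a s' =>
        rw [List.cons_prefix_cons, List.cons_prefix_cons]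
        exact and_congr_right fun _ => ih s' (by simpa using hcl _ hmem)

theorem pvOPL {w p q : List Char} {d : Char}
    (M : List (List Char × Int)) (SUF : List (List Char))
    (hw3 : 3 ≤ w.length)
    (hpw : p <+: w) (hqw : q <:+ w)
    (hp2 : 2 ≤ p.length) (hp3 : p.length ≤ 3) (hplt : p.length < w.length)
    (hq1 : q ≠ []) (hq2 : q.length ≤ 2)
    (hd : PySem.Chars.isdigit d = true)
    (hkeys : ∀ u ∈ w :: M.map Prod.fst,
      3 ≤ u.length ∧ u.all (fun c => !PySem.Chars.isdigit c) = true ∧ u.drop 1 ∈ SUF)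
    (hM : ∀ u ∈ M.map Prod.fst, ¬ u <+: w ∧ ¬ w <+: u)
    (hI : ∀ u ∈ w :: M.map Prod.fst, ∀ s ∈ w.tails, s.length < w.length → 2 ≤ s.length →
      ¬ u <+: s ∧ ¬ s <+: u)
    (hE : w.head? ≠ w.getLast?)
    (hcl : ∀ s ∈ SUF, s.tail ∈ SUF)
    (hs : ∀ s ∈ SUF, 2 ≤ s.length →
      s.all (fun c => !PySem.Chars.isdigit c) = true ∧ ¬ w <+: s ∧ (s <+: w → s <+: p)) :
    ∀ (l : List Char),
      pvScanW M (pvRep w (p ++ d :: q) l) = pvScanW ((w, pvVd d) :: M) l := by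
  have hww : w ≠ [] := by intro h; subst h; simp at hw3
  have hwdf : w.all (fun c => !PySem.Chars.isdigit c) = true := (hkeys w List.mem_cons_self).2.1
  have hwdig : ∀ c' ∈ w, PySem.Chars.isdigit c' = false := by
    intro c' hc'
    have := List.all_eq_true.1 hwdf c' hc'
    simpa using this
  have hTL : ∀ (u A t : List Char), u.drop 1 ∈ SUF → A ≠ [] →
      (u <+: A ++ pvRep w (p ++ d :: q) t ↔ u <+: A ++ t) := by
    intro u A t hu hA
    by_cases hle : u.length ≤ A.length
    · rw [pvPrefLe hle, pvPrefLe hle]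
    · have hAle : A.length ≤ u.length := by omega
      rw [pvPrefGt hAle, pvPrefGt hAle]
      refine and_congr_right fun _ => ?_
      have hdropmem : u.drop A.length ∈ SUF := by
        have hstep : ∀ k, List.drop k (List.drop 1 u) ∈ SUF := by
          intro k
          induction k with
          | zero => simpa using hu
          | succ k ihk =>
            have : List.drop (k + 1) (List.drop 1 u) = (List.drop k (List.drop 1 u)).tail := by
              rw [List.tail_drop]
            rw [this]
            exact hcl _ ihk
        have h2 := hstep (A.length - 1)
        rw [List.drop_drop] at h2
        have hA1 : 1 ≤ A.length := by cases A <;> simp_all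
        rw [show 1 + (A.length - 1) = A.length by omega] at h2
        exact h2
      exact pvRL2 SUF hpw hplt hp2 hd hcl hs t _ hdropmem
  have hkeymem : ∀ wv ∈ M, wv.1 ∈ w :: M.map Prod.fst := by
    intro wv hwv
    exact List.mem_cons_of_mem _ (List.mem_map_of_mem hwv)
  have main : ∀ N (l : List Char), l.length ≤ N →
      pvScanW M (pvRep w (p ++ d :: q) l) = pvScanW ((w, pvVd d) :: M) l := by
    intro N
    induction N with
    | zero =>
      intro l hl
      have : l = [] := by cases l <;> simp_all
      subst this
      simp [pvRep_nil, pvScanW]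
    | succ N ih =>
      intro l hl
      cases l with
      | nil => simp [pvRep_nil, pvScanW]
      | cons c t =>
        by_cases hw : w <+: (c :: t)
        · obtain ⟨t₂, hsplit⟩ := hw
          rw [← hsplit, pvRep_match _ t₂ hww]
          have hlen₂ : t₂.length ≤ N := by
            have := congrArg List.length hsplit
            simp at this hl
            omega
          -- decompose w = w0 :: pr' ++ [z]
          obtain ⟨w0, wt, hw0⟩ := List.exists_cons_of_ne_nil hww
          have hwtne : wt ≠ [] := by
            intro h
            rw [hw0, h] at hw3
            simp at hw3
          obtain ⟨pr', z, hwt⟩ : ∃ l' a, wt = l' ++ [a] := by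
            rcases List.eq_nil_or_concat wt with h1 | ⟨l', a, h1⟩
            · exact absurd h1 hwtne
            · exact ⟨l', a, by simpa [List.concat_eq_append] using h1⟩
          have hwz : w = (w0 :: pr') ++ [z] := by rw [hw0, hwt]; rfl
          have hzmem : z ∈ w := by rw [hwz]; simp
          have hlastz : w.getLast? = some z := by
            rw [hwz, List.getLast?_append]
            simp
          -- LHS: scan the p-segment, then the digit
          have hseg : ∀ c' s', (c' :: s') <:+ p →
              PySem.Chars.isdigit c' = false ∧
              ∀ wv ∈ M, ¬ wv.1 <+: (c' :: s') ++ (d :: (q ++ pvRep w (p ++ d :: q) t₂)) := by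
            intro c' s' hsfx
            constructor
            · exact hwdig c' (hpw.sublist.subset (hsfx.sublist.subset List.mem_cons_self))
            · intro wv hwv hpref
              have hu := hkeys wv.1 (hkeymem wv hwv)
              have hupref : wv.1 <+: c' :: s' := pvDfreePref hu.2.1 hd hpref
              have hlenu : wv.1.length ≤ (c' :: s').length := hupref.length_le
              have hlp : (c' :: s').length ≤ p.length := hsfx.length_le
              have h3 : 3 ≤ wv.1.length := hu.1
              have he1 : wv.1 = c' :: s' := hupref.eq_of_length (by omega)
              have he2 : (c' :: s') = p := hsfx.eq_of_length (by omega)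
              exact (hM wv.1 (List.mem_map_of_mem hwv)).1 (by rw [he1, he2]; exact hpw)
          have hLseg : pvScanW M ((p ++ d :: q) ++ pvRep w (p ++ d :: q) t₂) =
              pvVd d :: pvScanW M (q ++ pvRep w (p ++ d :: q) t₂) := by
            rw [List.append_assoc, List.cons_append, pvScan_seg M p _ hseg, pvScanW, if_pos hd]
          -- RHS: the w match at position 0
          have hRfirst : pvScanW ((w, pvVd d) :: M) (w ++ t₂) =
              pvVd d :: pvScanW ((w, pvVd d) :: M) (wt ++ t₂) := by
            conv_lhs => rw [hw0, List.cons_append, pvScanW]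
            rw [if_neg (by simp [hwdig w0 (by rw [hw0]; exact List.mem_cons_self)])]
            have hst : PySem.Chars.startswith (w0 :: (wt ++ t₂)) w = true := by
              rw [hw0, PySem.Chars.startswith]
              exact List.isPrefixOf_iff_prefix.2 (List.cons_prefix_cons.2 ⟨rfl, List.prefix_append _ _⟩)
            rw [List.findSome?_cons]
            rw [hw0] at hst ⊢
            simp [hst]
          -- RHS: scan the interior segment of w
          have hRseg : pvScanW ((w, pvVd d) :: M) (wt ++ t₂) =
              pvScanW ((w, pvVd d) :: M) (z :: t₂) := by
            rw [hwt, List.append_assoc]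
            apply pvScan_seg
            intro c' s' hsfx
            constructor
            · refine hwdig c' ?_
              rw [hwz]
              exact List.mem_append_left _ (List.mem_cons_of_mem _ (hsfx.sublist.subset List.mem_cons_self))
            · intro wv hwv hpref
              have humem : wv.1 ∈ w :: M.map Prod.fst := by
                rcases List.mem_cons.1 hwv with h | h
                · rw [h]; exact List.mem_cons_self
                · exact hkeymem wv h
              obtain ⟨pr0, hpr0⟩ := hsfx
              have h1 : (c' :: s').length ≤ pr'.length := by
                have := congrArg List.length hpr0
                simp only [List.length_append, List.length_cons] at this ⊢
                omega
              have hs₀suf : (c' :: s') ++ [z] <:+ w := by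
                refine ⟨w0 :: pr0, ?_⟩
                rw [hwz, ← hpr0]
                simp
              have hs₀len : ((c' :: s') ++ [z]).length < w.length := by
                have h2 : w.length = pr'.length + 2 := by
                  rw [hwz]
                  simp
                simp only [List.length_append, List.length_cons, List.length_nil] at h1 h2 ⊢
                omega
              have hIu := hI wv.1 humem ((c' :: s') ++ [z]) ((List.mem_tails _ _).2 hs₀suf) hs₀len (by simp)
              rw [← List.append_assoc] at hpref
              by_cases hle : wv.1.length ≤ ((c' :: s') ++ [z]).length
              · exact hIu.1 ((pvPrefLe (by simpa using hle)).1 hpref)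
              · exact hIu.2 ((pvPrefGt (by simp at hle ⊢; omega)).1 hpref).1
          -- final overlap position step
          have hoverlap : pvScanW M (z :: pvRep w (p ++ d :: q) t₂) =
              pvScanW ((w, pvVd d) :: M) (z :: t₂) := by
            have hdz : PySem.Chars.isdigit z = false := hwdig z hzmem
            rw [pvScanW, pvScanW, if_neg (by simp [hdz]), if_neg (by simp [hdz])]
            have hfw : PySem.Chars.startswith (z :: t₂) w = false := by
              rw [PySem.Chars.startswith]
              refine Bool.eq_false_iff.2 fun hcon => ?_
              have hpre := List.isPrefixOf_iff_prefix.1 hcon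
              have : w.head? = some z := by
                rw [hw0] at hpre ⊢
                obtain ⟨r, hr⟩ := hpre
                rw [List.cons_append] at hr
                injection hr with h1 _
                simp [h1]
              exact hE (this.trans hlastz.symm)
            rw [List.findSome?_cons]
            simp only [hfw, Bool.false_eq_true, if_false]
            have hcong : M.findSome? (fun wv => if PySem.Chars.startswith (z :: pvRep w (p ++ d :: q) t₂) wv.1 then some wv.2 else none) =
                M.findSome? (fun wv => if PySem.Chars.startswith (z :: t₂) wv.1 then some wv.2 else none) := by
              apply pvFindSome?_congr
              intro wv hwv
              have := hTL wv.1 [z] t₂ (hkeys wv.1 (hkeymem wv hwv)).2.2 (by simp)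
              simpa using this
            rw [hcong]
            cases hfs : M.findSome? (fun wv => if PySem.Chars.startswith (z :: t₂) wv.1 then some wv.2 else none) with
            | none => exact ih t₂ hlen₂
            | some v' => rw [ih t₂ hlen₂]
          rw [hLseg, hRfirst, hRseg]
          refine congrArg (List.cons (pvVd d)) ?_
          rcases q with _ | ⟨e0, q'⟩
          · exact absurd rfl hq1
          · rcases q' with _ | ⟨e1, q''⟩
            · -- q = [e0], so e0 = z
              have he0 : e0 = z := by
                obtain ⟨pr2, hpr2⟩ := hqw
                have h1 : (pr2 ++ [e0]).getLast? = some e0 := by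
                  rw [List.getLast?_append]
                  simp
                rw [hpr2, hlastz] at h1
                injection h1 with h1
                exact h1.symm
              subst he0
              rw [List.singleton_append]
              exact hoverlap
            · rcases q'' with _ | ⟨e2, q3⟩
              · -- q = [e0, e1], and e1 = z
                have he1 : e1 = z := by
                  obtain ⟨pr2, hpr2⟩ := hqw
                  have h1 : (pr2 ++ [e0, e1]).getLast? = some e1 := by
                    rw [List.getLast?_append]
                    simp
                  rw [hpr2, hlastz] at h1
                  injection h1 with h1
                  exact h1.symm
                subst he1
                have hde0 : PySem.Chars.isdigit e0 = false :=
                  hwdig e0 (hqw.sublist.subset List.mem_cons_self)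
                have hnone : M.findSome? (fun wv =>
                    if PySem.Chars.startswith (e0 :: e1 :: pvRep w (p ++ d :: [e0, e1]) t₂) wv.1
                    then some wv.2 else none) = none := by
                  apply pvFindSome?_none
                  intro wv hwv hpref
                  have hu := hkeys wv.1 (hkeymem wv hwv)
                  have hIq := hI wv.1 (hkeymem wv hwv) [e0, e1] ((List.mem_tails _ _).2 hqw)
                    (by simp; omega) (by simp)
                  have hpref' : wv.1 <+: [e0, e1] ++ pvRep w (p ++ d :: [e0, e1]) t₂ := hpref
                  have hgt : ([e0, e1] : List Char).length ≤ wv.1.length := by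
                    have := hu.1
                    simp
                    omega
                  exact hIq.2 ((pvPrefGt hgt).1 hpref').1
                show pvScanW M (e0 :: e1 :: pvRep w (p ++ d :: [e0, e1]) t₂) =
                  pvScanW ((w, pvVd d) :: M) (e1 :: t₂)
                rw [pvScanW, if_neg (by simp [hde0]), hnone]
                exact hoverlap
              · exfalso
                simp at hq2
        · rw [pvRep_cons_neg _ hw, pvScanW, pvScanW]
          have hlent : t.length ≤ N := by simp at hl; omega
          by_cases hc : PySem.Chars.isdigit c = true
          · rw [if_pos hc, if_pos hc, ih t hlent]
          · rw [if_neg hc, if_neg hc]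
            have hfw : PySem.Chars.startswith (c :: t) w = false := by
              rw [PySem.Chars.startswith]
              exact Bool.eq_false_iff.2 fun hcon => hw (List.isPrefixOf_iff_prefix.1 hcon)
            rw [List.findSome?_cons]
            simp only [hfw, Bool.false_eq_true, if_false]
            have hcong : M.findSome? (fun wv => if PySem.Chars.startswith (c :: pvRep w (p ++ d :: q) t) wv.1 then some wv.2 else none) =
                M.findSome? (fun wv => if PySem.Chars.startswith (c :: t) wv.1 then some wv.2 else none) := by
              apply pvFindSome?_congr
              intro wv hwv
              have := hTL wv.1 [c] t (hkeys wv.1 (hkeymem wv hwv)).2.2 (by simp)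
              simpa using this
            rw [hcong]
            cases hfs : M.findSome? (fun wv => if PySem.Chars.startswith (c :: t) wv.1 then some wv.2 else none) with
            | none => exact ih t hlent
            | some v' => rw [ih t hlent]
  exact fun l => main l.length l (le_refl _)

-- ---------- instantiation data ----------

def pvSUF : List (List Char) := [[], ['e'], ['e', 'e'], ['e', 'n'], ['e', 'r', 'o'], ['e', 'v', 'e', 'n'], ['g', 'h', 't'], ['h', 'r', 'e', 'e'], ['h', 't'], ['i', 'g', 'h', 't'], ['i', 'n', 'e'], ['i', 'v', 'e'], ['i', 'x'], ['n'], ['n', 'e'], ['o'], ['o', 'u', 'r'], ['r'], ['r', 'e', 'e'], ['r', 'o'], ['t'], ['u', 'r'], ['v', 'e'], ['v', 'e', 'n'], ['w', 'o'], ['x']]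

-- ---------- assembly ----------

theorem pvStep_one (y : List Char) :
    pvScanW [(['t', 'w', 'o'], 2), (['t', 'h', 'r', 'e', 'e'], 3), (['f', 'o', 'u', 'r'], 4), (['f', 'i', 'v', 'e'], 5), (['s', 'i', 'x'], 6), (['s', 'e', 'v', 'e', 'n'], 7), (['e', 'i', 'g', 'h', 't'], 8), (['n', 'i', 'n', 'e'], 9), (['z', 'e', 'r', 'o'], 0)] (pvRep ['o', 'n', 'e'] ['o', 'n', '1', 'e'] y) =
    pvScanW [(['o', 'n', 'e'], 1), (['t', 'w', 'o'], 2), (['t', 'h', 'r', 'e', 'e'], 3), (['f', 'o', 'u', 'r'], 4), (['f', 'i', 'v', 'e'], 5), (['s', 'i', 'x'], 6), (['s', 'e', 'v', 'e', 'n'], 7), (['e', 'i', 'g', 'h', 't'], 8), (['n', 'i', 'n', 'e'], 9), (['z', 'e', 'r', 'o'], 0)] y := by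
  have h := pvOPL (w := ['o', 'n', 'e']) (p := ['o', 'n']) (q := ['e']) (d := '1')
    [(['t', 'w', 'o'], 2), (['t', 'h', 'r', 'e', 'e'], 3), (['f', 'o', 'u', 'r'], 4), (['f', 'i', 'v', 'e'], 5), (['s', 'i', 'x'], 6), (['s', 'e', 'v', 'e', 'n'], 7), (['e', 'i', 'g', 'h', 't'], 8), (['n', 'i', 'n', 'e'], 9), (['z', 'e', 'r', 'o'], 0)] pvSUF
    (by decide) (by decide) (by decide) (by decide) (by decide) (by decide) (by decide)
    (by decide) (by decide) (by decide) (by decide) (by decide) (by decide) (by decide)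
    (by decide) y
  rw [show pvVd '1' = 1 by decide] at h
  exact h

theorem pvStep_two (y : List Char) :
    pvScanW [(['t', 'h', 'r', 'e', 'e'], 3), (['f', 'o', 'u', 'r'], 4), (['f', 'i', 'v', 'e'], 5), (['s', 'i', 'x'], 6), (['s', 'e', 'v', 'e', 'n'], 7), (['e', 'i', 'g', 'h', 't'], 8), (['n', 'i', 'n', 'e'], 9), (['z', 'e', 'r', 'o'], 0)] (pvRep ['t', 'w', 'o'] ['t', 'w', '2', 'o'] y) =
    pvScanW [(['t', 'w', 'o'], 2), (['t', 'h', 'r', 'e', 'e'], 3), (['f', 'o', 'u', 'r'], 4), (['f', 'i', 'v', 'e'], 5), (['s', 'i', 'x'], 6), (['s', 'e', 'v', 'e', 'n'], 7), (['e', 'i', 'g', 'h', 't'], 8), (['n', 'i', 'n', 'e'], 9), (['z', 'e', 'r', 'o'], 0)] y := by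
  have h := pvOPL (w := ['t', 'w', 'o']) (p := ['t', 'w']) (q := ['o']) (d := '2')
    [(['t', 'h', 'r', 'e', 'e'], 3), (['f', 'o', 'u', 'r'], 4), (['f', 'i', 'v', 'e'], 5), (['s', 'i', 'x'], 6), (['s', 'e', 'v', 'e', 'n'], 7), (['e', 'i', 'g', 'h', 't'], 8), (['n', 'i', 'n', 'e'], 9), (['z', 'e', 'r', 'o'], 0)] pvSUF
    (by decide) (by decide) (by decide) (by decide) (by decide) (by decide) (by decide)
    (by decide) (by decide) (by decide) (by decide) (by decide) (by decide) (by decide)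
    (by decide) y
  rw [show pvVd '2' = 2 by decide] at h
  exact h

theorem pvStep_three (y : List Char) :
    pvScanW [(['f', 'o', 'u', 'r'], 4), (['f', 'i', 'v', 'e'], 5), (['s', 'i', 'x'], 6), (['s', 'e', 'v', 'e', 'n'], 7), (['e', 'i', 'g', 'h', 't'], 8), (['n', 'i', 'n', 'e'], 9), (['z', 'e', 'r', 'o'], 0)] (pvRep ['t', 'h', 'r', 'e', 'e'] ['t', 'h', 'r', '3', 'e', 'e'] y) =
    pvScanW [(['t', 'h', 'r', 'e', 'e'], 3), (['f', 'o', 'u', 'r'], 4), (['f', 'i', 'v', 'e'], 5), (['s', 'i', 'x'], 6), (['s', 'e', 'v', 'e', 'n'], 7), (['e', 'i', 'g', 'h', 't'], 8), (['n', 'i', 'n', 'e'], 9), (['z', 'e', 'r', 'o'], 0)] y := by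
  have h := pvOPL (w := ['t', 'h', 'r', 'e', 'e']) (p := ['t', 'h', 'r']) (q := ['e', 'e']) (d := '3')
    [(['f', 'o', 'u', 'r'], 4), (['f', 'i', 'v', 'e'], 5), (['s', 'i', 'x'], 6), (['s', 'e', 'v', 'e', 'n'], 7), (['e', 'i', 'g', 'h', 't'], 8), (['n', 'i', 'n', 'e'], 9), (['z', 'e', 'r', 'o'], 0)] pvSUF
    (by decide) (by decide) (by decide) (by decide) (by decide) (by decide) (by decide)
    (by decide) (by decide) (by decide) (by decide) (by decide) (by decide) (by decide)
    (by decide) y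
  rw [show pvVd '3' = 3 by decide] at h
  exact h

theorem pvStep_four (y : List Char) :
    pvScanW [(['f', 'i', 'v', 'e'], 5), (['s', 'i', 'x'], 6), (['s', 'e', 'v', 'e', 'n'], 7), (['e', 'i', 'g', 'h', 't'], 8), (['n', 'i', 'n', 'e'], 9), (['z', 'e', 'r', 'o'], 0)] (pvRep ['f', 'o', 'u', 'r'] ['f', 'o', '4', 'u', 'r'] y) =
    pvScanW [(['f', 'o', 'u', 'r'], 4), (['f', 'i', 'v', 'e'], 5), (['s', 'i', 'x'], 6), (['s', 'e', 'v', 'e', 'n'], 7), (['e', 'i', 'g', 'h', 't'], 8), (['n', 'i', 'n', 'e'], 9), (['z', 'e', 'r', 'o'], 0)] y := by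
  have h := pvOPL (w := ['f', 'o', 'u', 'r']) (p := ['f', 'o']) (q := ['u', 'r']) (d := '4')
    [(['f', 'i', 'v', 'e'], 5), (['s', 'i', 'x'], 6), (['s', 'e', 'v', 'e', 'n'], 7), (['e', 'i', 'g', 'h', 't'], 8), (['n', 'i', 'n', 'e'], 9), (['z', 'e', 'r', 'o'], 0)] pvSUF
    (by decide) (by decide) (by decide) (by decide) (by decide) (by decide) (by decide)
    (by decide) (by decide) (by decide) (by decide) (by decide) (by decide) (by decide)
    (by decide) y
  rw [show pvVd '4' = 4 by decide] at h
  exact h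

theorem pvStep_five (y : List Char) :
    pvScanW [(['s', 'i', 'x'], 6), (['s', 'e', 'v', 'e', 'n'], 7), (['e', 'i', 'g', 'h', 't'], 8), (['n', 'i', 'n', 'e'], 9), (['z', 'e', 'r', 'o'], 0)] (pvRep ['f', 'i', 'v', 'e'] ['f', 'i', '5', 'v', 'e'] y) =
    pvScanW [(['f', 'i', 'v', 'e'], 5), (['s', 'i', 'x'], 6), (['s', 'e', 'v', 'e', 'n'], 7), (['e', 'i', 'g', 'h', 't'], 8), (['n', 'i', 'n', 'e'], 9), (['z', 'e', 'r', 'o'], 0)] y := by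
  have h := pvOPL (w := ['f', 'i', 'v', 'e']) (p := ['f', 'i']) (q := ['v', 'e']) (d := '5')
    [(['s', 'i', 'x'], 6), (['s', 'e', 'v', 'e', 'n'], 7), (['e', 'i', 'g', 'h', 't'], 8), (['n', 'i', 'n', 'e'], 9), (['z', 'e', 'r', 'o'], 0)] pvSUF
    (by decide) (by decide) (by decide) (by decide) (by decide) (by decide) (by decide)
    (by decide) (by decide) (by decide) (by decide) (by decide) (by decide) (by decide)
    (by decide) y
  rw [show pvVd '5' = 5 by decide] at h
  exact h

theorem pvStep_six (y : List Char) :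
    pvScanW [(['s', 'e', 'v', 'e', 'n'], 7), (['e', 'i', 'g', 'h', 't'], 8), (['n', 'i', 'n', 'e'], 9), (['z', 'e', 'r', 'o'], 0)] (pvRep ['s', 'i', 'x'] ['s', 'i', '6', 'x'] y) =
    pvScanW [(['s', 'i', 'x'], 6), (['s', 'e', 'v', 'e', 'n'], 7), (['e', 'i', 'g', 'h', 't'], 8), (['n', 'i', 'n', 'e'], 9), (['z', 'e', 'r', 'o'], 0)] y := by
  have h := pvOPL (w := ['s', 'i', 'x']) (p := ['s', 'i']) (q := ['x']) (d := '6')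
    [(['s', 'e', 'v', 'e', 'n'], 7), (['e', 'i', 'g', 'h', 't'], 8), (['n', 'i', 'n', 'e'], 9), (['z', 'e', 'r', 'o'], 0)] pvSUF
    (by decide) (by decide) (by decide) (by decide) (by decide) (by decide) (by decide)
    (by decide) (by decide) (by decide) (by decide) (by decide) (by decide) (by decide)
    (by decide) y
  rw [show pvVd '6' = 6 by decide] at h
  exact h

theorem pvStep_seven (y : List Char) :
    pvScanW [(['e', 'i', 'g', 'h', 't'], 8), (['n', 'i', 'n', 'e'], 9), (['z', 'e', 'r', 'o'], 0)] (pvRep ['s', 'e', 'v', 'e', 'n'] ['s', 'e', '7', 'e', 'n'] y) =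
    pvScanW [(['s', 'e', 'v', 'e', 'n'], 7), (['e', 'i', 'g', 'h', 't'], 8), (['n', 'i', 'n', 'e'], 9), (['z', 'e', 'r', 'o'], 0)] y := by
  have h := pvOPL (w := ['s', 'e', 'v', 'e', 'n']) (p := ['s', 'e']) (q := ['e', 'n']) (d := '7')
    [(['e', 'i', 'g', 'h', 't'], 8), (['n', 'i', 'n', 'e'], 9), (['z', 'e', 'r', 'o'], 0)] pvSUF
    (by decide) (by decide) (by decide) (by decide) (by decide) (by decide) (by decide)
    (by decide) (by decide) (by decide) (by decide) (by decide) (by decide) (by decide)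
    (by decide) y
  rw [show pvVd '7' = 7 by decide] at h
  exact h

theorem pvStep_eight (y : List Char) :
    pvScanW [(['n', 'i', 'n', 'e'], 9), (['z', 'e', 'r', 'o'], 0)] (pvRep ['e', 'i', 'g', 'h', 't'] ['e', 'i', '8', 'h', 't'] y) =
    pvScanW [(['e', 'i', 'g', 'h', 't'], 8), (['n', 'i', 'n', 'e'], 9), (['z', 'e', 'r', 'o'], 0)] y := by
  have h := pvOPL (w := ['e', 'i', 'g', 'h', 't']) (p := ['e', 'i']) (q := ['h', 't']) (d := '8')
    [(['n', 'i', 'n', 'e'], 9), (['z', 'e', 'r', 'o'], 0)] pvSUF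
    (by decide) (by decide) (by decide) (by decide) (by decide) (by decide) (by decide)
    (by decide) (by decide) (by decide) (by decide) (by decide) (by decide) (by decide)
    (by decide) y
  rw [show pvVd '8' = 8 by decide] at h
  exact h

theorem pvStep_nine (y : List Char) :
    pvScanW [(['z', 'e', 'r', 'o'], 0)] (pvRep ['n', 'i', 'n', 'e'] ['n', 'i', '9', 'n', 'e'] y) =
    pvScanW [(['n', 'i', 'n', 'e'], 9), (['z', 'e', 'r', 'o'], 0)] y := by
  have h := pvOPL (w := ['n', 'i', 'n', 'e']) (p := ['n', 'i']) (q := ['n', 'e']) (d := '9')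
    [(['z', 'e', 'r', 'o'], 0)] pvSUF
    (by decide) (by decide) (by decide) (by decide) (by decide) (by decide) (by decide)
    (by decide) (by decide) (by decide) (by decide) (by decide) (by decide) (by decide)
    (by decide) y
  rw [show pvVd '9' = 9 by decide] at h
  exact h

theorem pvStep_zero (y : List Char) :
    pvScanW [] (pvRep ['z', 'e', 'r', 'o'] ['z', 'e', '0', 'r', 'o'] y) =
    pvScanW [(['z', 'e', 'r', 'o'], 0)] y := by
  have h := pvOPL (w := ['z', 'e', 'r', 'o']) (p := ['z', 'e']) (q := ['r', 'o']) (d := '0')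
    [] pvSUF
    (by decide) (by decide) (by decide) (by decide) (by decide) (by decide) (by decide)
    (by decide) (by decide) (by decide) (by decide) (by decide) (by decide) (by decide)
    (by decide) y
  rw [show pvVd '0' = 0 by decide] at h
  exact h

theorem pvScan_chain (x : List Char) :
    ((pvPairsA.foldl (fun s pr => pvRep pr.1 pr.2 s) x).filter PySem.Chars.isdigit).map pvVd =
      pvScanW pvWords x := by
  rw [← pvScan_nilW]
  simp only [pvPairsA, List.foldl_cons, List.foldl_nil]
  rw [pvStep_zero, pvStep_nine, pvStep_eight, pvStep_seven, pvStep_six, pvStep_five,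
      pvStep_four, pvStep_three, pvStep_two, pvStep_one]
  rfl

theorem pvGet0 {α : Type} (xs : List α) : PySem.List.pyGet? xs 0 = xs.head? := by
  cases xs <;> simp [PySem.List.pyGet?, PySem.List.pyIdx?]

theorem pvGetNeg1 {α : Type} (xs : List α) (h : xs ≠ []) :
    PySem.List.pyGet? xs (-1) = xs.getLast? := by
  have hn : 1 ≤ xs.length := by
    cases xs
    · exact absurd rfl h
    · simp
  have hidx : PySem.List.pyIdx? xs.length (-1) = some (xs.length - 1) := by
    rw [PySem.List.pyIdx?, if_neg (by norm_num), if_pos (by omega)]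
    norm_num
  rw [PySem.List.pyGet?, hidx]
  rw [List.getLast?_eq_getElem?]
  rfl

theorem pvLine_eq (line : List Char) :
    pvLineA (pvPairsA.foldl (fun s pr => pvRep pr.1 pr.2 s) line) = pvLineB line := by
  have hch := pvScan_chain line
  simp only [pvLineA, pvLineB]
  rw [← hch]
  cases hD : (pvPairsA.foldl (fun s pr => pvRep pr.1 pr.2 s) line).filter PySem.Chars.isdigit with
  | nil => simp [pvGet0]
  | cons a as =>
    obtain ⟨b, hb⟩ : ∃ b, (a :: as).getLast? = some b := by
      cases hg : (a :: as).getLast?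
      · exact absurd (List.getLast?_eq_none_iff.1 hg) (List.cons_ne_nil a as)
      · exact ⟨_, rfl⟩
    rw [pvGet0, pvGet0, pvGetNeg1 _ (List.cons_ne_nil a as), pvGetNeg1 _ (by simp),
        List.head?_map, List.getLast?_map, hb]
    rfl

theorem pvMain (data : String) : better_part_two data = better_part_two_alt data := by
  rw [better_part_two, better_part_two_alt, pvPartOne]
  have hfold : pvPairsA.foldl (fun s pr => PySem.Chars.replace s pr.1 pr.2) data.toList =
      pvPairsA.foldl (fun s pr => pvRep pr.1 pr.2 s) data.toList := by
    simp only [pvPairsA, List.foldl_cons, List.foldl_nil]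
    rw [pvReplace_eq _ ['o', 'n', 'e'] ['o', 'n', '1', 'e'] (by decide),
        pvReplace_eq _ ['t', 'w', 'o'] ['t', 'w', '2', 'o'] (by decide),
        pvReplace_eq _ ['t', 'h', 'r', 'e', 'e'] ['t', 'h', 'r', '3', 'e', 'e'] (by decide),
        pvReplace_eq _ ['f', 'o', 'u', 'r'] ['f', 'o', '4', 'u', 'r'] (by decide),
        pvReplace_eq _ ['f', 'i', 'v', 'e'] ['f', 'i', '5', 'v', 'e'] (by decide),
        pvReplace_eq _ ['s', 'i', 'x'] ['s', 'i', '6', 'x'] (by decide),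
        pvReplace_eq _ ['s', 'e', 'v', 'e', 'n'] ['s', 'e', '7', 'e', 'n'] (by decide),
        pvReplace_eq _ ['e', 'i', 'g', 'h', 't'] ['e', 'i', '8', 'h', 't'] (by decide),
        pvReplace_eq _ ['n', 'i', 'n', 'e'] ['n', 'i', '9', 'n', 'e'] (by decide),
        pvReplace_eq _ ['z', 'e', 'r', 'o'] ['z', 'e', '0', 'r', 'o'] (by decide)]
  rw [hfold, pvSplitlines_eq, pvSplitlines_eq]
  have hcom : pvSplit [] (pvPairsA.foldl (fun s pr => pvRep pr.1 pr.2 s) data.toList) =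
      (pvSplit [] data.toList).map
        (fun line => pvPairsA.foldl (fun s pr => pvRep pr.1 pr.2 s) line) := by
    simp only [pvPairsA, List.foldl_cons, List.foldl_nil]
    rw [pvSplit_rep (by decide) (by decide) (pvBF _ (by decide))
          (pvBF _ (by decide)) (by decide),
        pvSplit_rep (by decide) (by decide) (pvBF _ (by decide))
          (pvBF _ (by decide)) (by decide),
        pvSplit_rep (by decide) (by decide) (pvBF _ (by decide))
          (pvBF _ (by decide)) (by decide),
        pvSplit_rep (by decide) (by decide) (pvBF _ (by decide))
          (pvBF _ (by decide)) (by decide),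
        pvSplit_rep (by decide) (by decide) (pvBF _ (by decide))
          (pvBF _ (by decide)) (by decide),
        pvSplit_rep (by decide) (by decide) (pvBF _ (by decide))
          (pvBF _ (by decide)) (by decide),
        pvSplit_rep (by decide) (by decide) (pvBF _ (by decide))
          (pvBF _ (by decide)) (by decide),
        pvSplit_rep (by decide) (by decide) (pvBF _ (by decide))
          (pvBF _ (by decide)) (by decide),
        pvSplit_rep (by decide) (by decide) (pvBF _ (by decide))
          (pvBF _ (by decide)) (by decide),
        pvSplit_rep (by decide) (by decide) (pvBF _ (by decide))
          (pvBF _ (by decide)) (by decide)]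
    simp [List.map_map, Function.comp]
  rw [hcom, List.foldl_map]
  have hfold2 : ∀ (L : List (List Char)) (init : Int),
      L.foldl (fun tot line =>
        tot + pvLineA (pvPairsA.foldl (fun s pr => pvRep pr.1 pr.2 s) line)) init =
      L.foldl (fun tot line => tot + pvLineB line) init := by
    intro L
    induction L with
    | nil => intro init; rfl
    | cons hd tl ih =>
      intro init
      simp only [List.foldl_cons, pvLine_eq hd, ih]
  exact hfold2 _ 0

-- ===== VERDICT (by name: the statement is the Claim_ definition above) =====
theorem better_part_two_spec : Claim_equal_better_part_two := by
  intro data _ _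
  unfold Spec_better_part_two
  exact pvMain data
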